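-- pv_equiv track=rewrite | github.com/maengjh0208/algorithm_coding_test | 공 이동 시뮬레이션.py | solution
-- ===== SOURCE A (Python) =====
-- def solution(n, m, x, y, queries):
--     left_up_location = [x, y]
--     right_down_location = [x, y]
--
--     for direction, distance in queries[::-1]:
--         if direction == 0:
--             # 끝지점에 있다면 영역을 넓히고
--             if left_up_location[1] == 0:
--                 right_down_location[1] = min(right_down_location[1] + distance, m - 1)
--             # 아니라면 옮긴다.
--             elif left_up_location[1] + distance < m:
--                 left_up_location[1] += distance
--                 right_down_location[1] = min(right_down_location[1] + distance, m - 1)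
--             # 공을 굴려도 목적지에 닿을 수 없는 케이스
--             else:
--                 break
--         elif direction == 1:
--             # 끝지점에 있다면 영역을 넓히고
--             if right_down_location[1] == m - 1:
--                 left_up_location[1] = max(left_up_location[1] - distance, 0)
--             # 아니라면 옮긴다.
--             elif right_down_location[1] - distance >= 0:
--                 right_down_location[1] -= distance
--                 left_up_location[1] = max(left_up_location[1] - distance, 0)
--             # 공을 굴려도 목적지에 닿을 수 없는 케이스
--             else:
--                 break
--         elif direction == 2:
--             # 끝지점에 있다면 영역을 넓히고
--             if left_up_location[0] == 0:
--                 right_down_location[0] = min(right_down_location[0] + distance, n - 1)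
--             # 아니라면 옮긴다.
--             elif left_up_location[0] + distance < n:
--                 left_up_location[0] += distance
--                 right_down_location[0] = min(right_down_location[0] + distance, n - 1)
--             # 공을 굴려도 목적지에 닿을 수 없는 케이스
--             else:
--                 break
--         else:
--             # 끝지점에 있다면 영역을 넓히고
--             if right_down_location[0] == n - 1:
--                 left_up_location[0] = max(left_up_location[0] - distance, 0)
--             # 아니라면 옮긴다.
--             elif right_down_location[0] - distance >= 0:
--                 right_down_location[0] -= distance
--                 left_up_location[0] = max(left_up_location[0] - distance, 0)
--             # 공을 굴려도 목적지에 닿을 수 없는 케이스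
--             else:
--                 break
--     else:
--         return (right_down_location[0] - left_up_location[0] + 1) * (right_down_location[1] - left_up_location[1] + 1)
--
--     return 0
-- ===== SOURCE B (Python) =====
-- def _col_low(m, y, queries):
--     # trajectory of the column lower bound alone; None = unreachable
--     lo = y
--     for d, dist in reversed(queries):
--         if d == 0:
--             if lo != 0:
--                 if lo + dist < m:
--                     lo += dist
--                 else:
--                     return None
--         elif d == 1:
--             lo = max(lo - dist, 0)
--     return lo
--
--
-- def _col_high(m, y, queries):
--     hi = y
--     for d, dist in reversed(queries):
--         if d == 0:
--             hi = min(hi + dist, m - 1)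
--         elif d == 1:
--             if hi != m - 1:
--                 if hi - dist >= 0:
--                     hi -= dist
--                 else:
--                     return None
--     return hi
--
--
-- def _row_low(n, x, queries):
--     lo = x
--     for d, dist in reversed(queries):
--         if d == 2:
--             if lo != 0:
--                 if lo + dist < n:
--                     lo += dist
--                 else:
--                     return None
--         elif d == 0 or d == 1:
--             pass
--         else:
--             lo = max(lo - dist, 0)
--     return lo
--
--
-- def _row_high(n, x, queries):
--     hi = x
--     for d, dist in reversed(queries):
--         if d == 2:
--             hi = min(hi + dist, n - 1)
--         elif d == 0 or d == 1:
--             pass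
--         else:
--             if hi != n - 1:
--                 if hi - dist >= 0:
--                     hi -= dist
--                 else:
--                     return None
--     return hi
--
--
-- def solution(n, m, x, y, queries):
--     rl = _row_low(n, x, queries)
--     rh = _row_high(n, x, queries)
--     cl = _col_low(m, y, queries)
--     ch = _col_high(m, y, queries)
--     if rl is None or rh is None or cl is None or ch is None:
--         return 0
--     return (rh - rl + 1) * (ch - cl + 1)
-- ===== Notes on version B (the rewrite author's own statement) =====
-- stated objective: alternative
-- what changed: B exploits that no bound of A's rectangle ever reads another bound: it computes the four bounds (row-low, row-high, col-low, col-high) as four independent scalar trajectories, each in its own pass with its own local failure condition, so A's three-way extend/move/fail branch disappears (forward high and backward low become unconditional clamps) and the result is 0 if any trajectory fails, else the product of the two spans.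
import Mathlib
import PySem

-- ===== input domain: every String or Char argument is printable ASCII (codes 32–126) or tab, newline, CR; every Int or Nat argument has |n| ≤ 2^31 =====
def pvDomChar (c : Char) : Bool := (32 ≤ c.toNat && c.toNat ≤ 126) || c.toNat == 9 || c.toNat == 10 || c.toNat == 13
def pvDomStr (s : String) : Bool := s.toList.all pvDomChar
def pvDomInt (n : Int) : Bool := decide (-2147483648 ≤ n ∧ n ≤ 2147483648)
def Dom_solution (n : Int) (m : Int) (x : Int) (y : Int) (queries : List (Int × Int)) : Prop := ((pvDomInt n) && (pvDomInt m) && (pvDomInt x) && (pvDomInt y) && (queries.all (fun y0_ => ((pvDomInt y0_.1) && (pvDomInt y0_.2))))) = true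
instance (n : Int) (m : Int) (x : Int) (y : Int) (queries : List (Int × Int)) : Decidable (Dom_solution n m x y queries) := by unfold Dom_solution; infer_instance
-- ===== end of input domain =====

-- B replaces A's single interleaved rectangle simulation by four independent scalar bound
-- trajectories, each with its own pass and failure condition (alternative decomposition, same cost).

-- ===== PORT A =====
-- A's for-loop over queries[::-1] carrying (left_up, right_down); `none` models `break` (then A returns 0).
def pvLoopA (n m : Int) : List (Int × Int) → Int → Int → Int → Int → Option (Int × Int × Int × Int)
  | [], lx, ly, hx, hy => some (lx, ly, hx, hy)
  | (direction, distance) :: rest, lx, ly, hx, hy =>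
    if direction = 0 then
      if ly = 0 then pvLoopA n m rest lx ly hx (min (hy + distance) (m - 1))
      else if ly + distance < m then pvLoopA n m rest lx (ly + distance) hx (min (hy + distance) (m - 1))
      else none
    else if direction = 1 then
      if hy = m - 1 then pvLoopA n m rest lx (max (ly - distance) 0) hx hy
      else if hy - distance ≥ 0 then pvLoopA n m rest lx (max (ly - distance) 0) hx (hy - distance)
      else none
    else if direction = 2 then
      if lx = 0 then pvLoopA n m rest lx ly (min (hx + distance) (n - 1)) hy
      else if lx + distance < n then pvLoopA n m rest (lx + distance) ly (min (hx + distance) (n - 1)) hy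
      else none
    else
      if hx = n - 1 then pvLoopA n m rest (max (lx - distance) 0) ly hx hy
      else if hx - distance ≥ 0 then pvLoopA n m rest (max (lx - distance) 0) ly (hx - distance) hy
      else none

def solution (n : Int) (m : Int) (x : Int) (y : Int) (queries : List (Int × Int)) : Int :=
  match pvLoopA n m queries.reverse x y x y with
  | some (lx, ly, hx, hy) => (hx - lx + 1) * (hy - ly + 1)
  | none => 0

-- ===== PORT B =====
-- Source B's `_col_low`: trajectory of the column lower bound alone; `none` models its `return None`.
def pvColLowB (m : Int) : Int → List (Int × Int) → Option Int
  | lo, [] => some lo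
  | lo, (d, dist) :: rest =>
    if d = 0 then
      if lo ≠ 0 then
        if lo + dist < m then pvColLowB m (lo + dist) rest else none
      else pvColLowB m lo rest
    else if d = 1 then pvColLowB m (max (lo - dist) 0) rest
    else pvColLowB m lo rest

-- Source B's `_col_high`
def pvColHighB (m : Int) : Int → List (Int × Int) → Option Int
  | hi, [] => some hi
  | hi, (d, dist) :: rest =>
    if d = 0 then pvColHighB m (min (hi + dist) (m - 1)) rest
    else if d = 1 then
      if hi ≠ m - 1 then
        if hi - dist ≥ 0 then pvColHighB m (hi - dist) rest else none
      else pvColHighB m hi rest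
    else pvColHighB m hi rest

-- Source B's `_row_low`
def pvRowLowB (n : Int) : Int → List (Int × Int) → Option Int
  | lo, [] => some lo
  | lo, (d, dist) :: rest =>
    if d = 2 then
      if lo ≠ 0 then
        if lo + dist < n then pvRowLowB n (lo + dist) rest else none
      else pvRowLowB n lo rest
    else if d = 0 ∨ d = 1 then pvRowLowB n lo rest
    else pvRowLowB n (max (lo - dist) 0) rest

-- Source B's `_row_high`
def pvRowHighB (n : Int) : Int → List (Int × Int) → Option Int
  | hi, [] => some hi
  | hi, (d, dist) :: rest =>
    if d = 2 then pvRowHighB n (min (hi + dist) (n - 1)) rest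
    else if d = 0 ∨ d = 1 then pvRowHighB n hi rest
    else
      if hi ≠ n - 1 then
        if hi - dist ≥ 0 then pvRowHighB n (hi - dist) rest else none
      else pvRowHighB n hi rest

def solution_alt (n : Int) (m : Int) (x : Int) (y : Int) (queries : List (Int × Int)) : Int :=
  match pvRowLowB n x queries.reverse, pvRowHighB n x queries.reverse,
        pvColLowB m y queries.reverse, pvColHighB m y queries.reverse with
  | some rl, some rh, some cl, some ch => (rh - rl + 1) * (ch - cl + 1)
  | _, _, _, _ => 0

-- ===== PRECONDITION & SPEC =====
def Spec_solution (n : Int) (m : Int) (x : Int) (y : Int) (queries : List (Int × Int)) (out : Int) : Prop := out = solution_alt n m x y queries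
instance (n : Int) (m : Int) (x : Int) (y : Int) (queries : List (Int × Int)) (out : Int) : Decidable (Spec_solution n m x y queries out) := by unfold Spec_solution; infer_instance

-- ===== CLAIM (what is proved, stated in full; the proofs are below) =====
def Claim_equal_solution : Prop := ∀ (n : Int) (m : Int) (x : Int) (y : Int) (queries : List (Int × Int)), Dom_solution n m x y queries → Spec_solution n m x y queries (solution n m x y queries)

-- ===== LEMMAS AND PROOFS =====

-- combine the four scalar outcomes into A's loop outcome (state order lx ly hx hy)
def pvComb (rl rh cl ch : Option Int) : Option (Int × Int × Int × Int) :=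
  match rl, rh, cl, ch with
  | some a, some b, some c, some d => some (a, c, b, d)
  | _, _, _, _ => none

lemma pvComb_rl_none (rh cl ch : Option Int) : pvComb none rh cl ch = none := by
  rcases rh with _ | _ <;> rcases cl with _ | _ <;> rcases ch with _ | _ <;> rfl

lemma pvComb_rh_none (rl cl ch : Option Int) : pvComb rl none cl ch = none := by
  rcases rl with _ | _ <;> rcases cl with _ | _ <;> rcases ch with _ | _ <;> rfl

lemma pvComb_cl_none (rl rh ch : Option Int) : pvComb rl rh none ch = none := by
  rcases rl with _ | _ <;> rcases rh with _ | _ <;> rcases ch with _ | _ <;> rfl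

lemma pvComb_ch_none (rl rh cl : Option Int) : pvComb rl rh cl none = none := by
  rcases rl with _ | _ <;> rcases rh with _ | _ <;> rcases cl with _ | _ <;> rfl

-- A's interleaved 4-state loop equals the four independent bound trajectories combined
lemma pvLoop_decomp (n m : Int) : ∀ (l : List (Int × Int)) (lx ly hx hy : Int),
    pvLoopA n m l lx ly hx hy =
      pvComb (pvRowLowB n lx l) (pvRowHighB n hx l) (pvColLowB m ly l) (pvColHighB m hy l) := by
  intro l
  induction l with
  | nil => intro lx ly hx hy; rfl
  | cons q rest ih =>
    obtain ⟨d, dist⟩ := q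
    intro lx ly hx hy
    by_cases h0 : d = 0
    · simp only [pvLoopA, pvRowLowB, pvRowHighB, pvColLowB, pvColHighB, h0, if_true, true_or]
      by_cases hc1 : ly = 0
      · simp [hc1, ih]
      · by_cases hc2 : ly + dist < m
        · simp [hc1, hc2, ih]
        · simp [hc1, hc2, pvComb_cl_none]
    · by_cases h1 : d = 1
      · simp only [pvLoopA, pvRowLowB, pvRowHighB, pvColLowB, pvColHighB, h1, if_true, or_true]
        by_cases hc1 : hy = m - 1
        · simp [hc1, ih]
        · by_cases hc2 : hy - dist ≥ 0
          · simp [hc1, (show dist ≤ hy by omega), ih]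
          · simp [hc1, (show ¬ dist ≤ hy by omega), pvComb_ch_none]
      · by_cases h2 : d = 2
        · simp only [pvLoopA, pvRowLowB, pvRowHighB, pvColLowB, pvColHighB, h2, if_true]
          by_cases hc1 : lx = 0
          · simp [hc1, ih]
          · by_cases hc2 : lx + dist < n
            · simp [hc1, hc2, ih]
            · simp [hc1, hc2, pvComb_rl_none]
        · have hor : ¬ (d = 0 ∨ d = 1) := by tauto
          simp only [pvLoopA, pvRowLowB, pvRowHighB, pvColLowB, pvColHighB,
            if_neg h0, if_neg h1, if_neg h2, if_neg hor]
          by_cases hc1 : hx = n - 1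
          · simp [hc1, ih]
          · by_cases hc2 : hx - dist ≥ 0
            · simp [hc1, (show dist ≤ hx by omega), ih]
            · simp [hc1, (show ¬ dist ≤ hx by omega), pvComb_rh_none]

-- ===== VERDICT (by name: the statement is the Claim_ definition above) =====
theorem solution_spec : Claim_equal_solution := by
  intro n m x y queries _
  unfold Spec_solution solution solution_alt
  rw [pvLoop_decomp]
  unfold pvComb
  rcases pvRowLowB n x queries.reverse with _ | rl <;>
    rcases pvRowHighB n x queries.reverse with _ | rh <;>
      rcases pvColLowB m y queries.reverse with _ | cl <;>
        rcases pvColHighB m y queries.reverse with _ | ch <;> rfl
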